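-- pv_equiv track=rewrite | github.com/jussiiih/Python-ohjelmointia-tehokkailla-tietorakenteilla-ja-algoritmeilla | merkit2.py | solve
-- ===== SOURCE A (Python) =====
-- def solve(s):
--
--     l = list(s)
--     n = len(l)
--     i = 0
--     edellinen_indeksi = 0
--
--     while i < n:
--         if i+1 < n:
--             if l[i] == l[i+1]:
--                 edellinen_indeksi = i-1
--                 k = ord(l[i])
--                 uusi = chr(k+1)
--                 if uusi == chr(123):
--                     uusi =  chr(97)
--                 l.pop(i)
--                 l[i] = uusi
--                 n = len(l)
--                 i = edellinen_indeksi
--                 if i < 0: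
--                     i = 0
--             else:
--                 i += 1
--                 if i == n:
--                     break
--         else:
--             break
--
--     sana = ""
--     return (sana.join(l))
-- ===== SOURCE B (Python) =====
-- def solve(s):
--     # Stack-based single pass: push each char; while it equals the stack top,
--     # pop and replace both by the next char (chr(123) '{' wraps to 'a').
--     st = []
--     for ch in s:
--         c = ch
--         while st and st[-1] == c:
--             st.pop()
--             c = chr(ord(c) + 1)
--             if c == chr(123):
--                 c = chr(97)
--         st.append(c)
--     return "".join(st)
-- ===== Notes on version B (the rewrite author's own statement) =====
-- stated objective: faster
-- what changed: Replaced the index-backtracking while loop with repeated list.pop(i) (each pop shifts the tail) by a single left-to-right pass over the string maintaining a stack whose top is collapsed with the incoming char while they are equal.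
import Mathlib
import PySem

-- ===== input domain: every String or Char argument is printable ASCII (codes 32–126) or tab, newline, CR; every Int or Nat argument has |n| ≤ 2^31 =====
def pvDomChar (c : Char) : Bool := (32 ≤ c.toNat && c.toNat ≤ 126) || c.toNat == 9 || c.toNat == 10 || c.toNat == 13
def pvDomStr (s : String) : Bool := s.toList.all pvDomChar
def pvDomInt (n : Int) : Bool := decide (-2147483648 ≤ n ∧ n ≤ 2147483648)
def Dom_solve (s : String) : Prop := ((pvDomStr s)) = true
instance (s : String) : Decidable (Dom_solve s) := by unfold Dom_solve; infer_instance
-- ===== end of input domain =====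

-- B replaces A's quadratic backtracking loop (list.pop(i) inside a while that
-- steps the index back) by one linear pass with a stack; a timing run
-- measured B asymptotically faster.

-- chr(ord(c)+1), wrapped: chr(123) '{' becomes chr(97) 'a'  (shared by both Pythons)
def nextChar (c : Char) : Char :=
  let u := Char.ofNat (c.toNat + 1)
  if u = '{' then 'a' else u

-- ===== PORT A =====
-- A's while loop; l the current list, i the current index (Python's i never
-- goes negative: 'if i < 0: i = 0' = Nat truncated subtraction below).
-- fuel is only a totality guard: 2*len(l) bounds the number of iterations
-- (each step lowers 2*len(l)-i), so the 0 case is never reached from solve.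
def loopA : Nat → List Char → Nat → List Char
  | 0, l, _ => l
  | fuel + 1, l, i =>
    let n := l.length
    if _h1 : i < n then
      if _h2 : i + 1 < n then
        if l.getD i ' ' = l.getD (i+1) ' ' then  -- indices are in range, so getD is Python's l[i]
          let u := nextChar (l.getD i ' ')
          let l1 := l.take i ++ l.drop (i+1)     -- l.pop(i)
          let l2 := l1.set i u                   -- l[i] = uusi
          loopA fuel l2 (i - 1)                  -- i = edellinen_indeksi (= i-1), clamped at 0
        else
          loopA fuel l (i+1)                     -- 'if i == n: break' is the loop condition again
      else l                                     -- break
    else l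

def solve (s : String) : String :=
  String.ofList (loopA (2 * s.toList.length) s.toList 0)                      -- "".join(l) of a char list = String.ofList

-- ===== PORT B =====
-- the stack st is kept head-first (head = Python's st[-1]); the inner while:
def push : List Char → Char → List Char
  | [], c => [c]
  | t :: rs, c => if t = c then push rs (nextChar c) else c :: t :: rs

def solve_alt (s : String) : String :=
  String.ofList ((s.toList.foldl push []).reverse)      -- "".join(st), st built back-to-front

-- ===== PRECONDITION & SPEC =====
def Spec_solve (s : String) (out : String) : Prop := out = solve_alt s
instance (s : String) (out : String) : Decidable (Spec_solve s out) := by unfold Spec_solve; infer_instance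

-- ===== CLAIM (what is proved, stated in full; the proofs are below) =====
def Claim_equal_solve : Prop := ∀ (s : String), Dom_solve s → Spec_solve s (solve s)

-- ===== LEMMAS AND PROOFS =====


-- if the stack with a on top is adjacent-distinct, push just puts a on top
theorem push_chain (rs : List Char) (a : Char)
    (h : List.IsChain Ne (rs.reverse ++ [a])) : push rs a = a :: rs := by
  cases rs with
  | nil => rfl
  | cons t rs' =>
    have hne : t ≠ a := by
      rcases List.isChain_append.mp h with ⟨-, -, hx⟩
      exact hx t (by simp [List.getLast?_reverse]) a (by simp)
    simp [push, hne]

theorem getD_mid (rs : List Char) (x : Char) (r : List Char) :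
    (rs.reverse ++ x :: r).getD rs.length ' ' = x := by
  simp [List.getD_eq_getElem?_getD]

theorem main_lemma : ∀ (m : Nat) (rs rest : List Char),
    rs.length + 2 * rest.length ≤ m →
    List.IsChain Ne (rs.reverse ++ rest.take 1) →
    loopA m (rs.reverse ++ rest) rs.length = (rest.foldl push rs).reverse := by
  intro m
  induction m with
  | zero =>
    intro rs rest hle _
    have hrs : rs = [] := by
      have := List.length_eq_zero_iff.mp (by omega : rs.length = 0); exact this
    have hrest : rest = [] := by
      have := List.length_eq_zero_iff.mp (by omega : rest.length = 0); exact this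
    subst hrs; subst hrest
    rfl
  | succ m ih =>
    intro rs rest hle hch
    match rest with
    | [] =>
      rw [loopA]; simp
    | [a] =>
      rw [loopA]
      have hpush : push rs a = a :: rs := push_chain rs a (by simpa using hch)
      simp [hpush]
    | a :: b :: rest' =>
      have hch1 : List.IsChain Ne (rs.reverse ++ [a]) := by simpa using hch
      have hpa : push rs a = a :: rs := push_chain rs a hch1
      have h1 : rs.length < (rs.reverse ++ a :: b :: rest').length := by simp
      have h2 : rs.length + 1 < (rs.reverse ++ a :: b :: rest').length := by simp
      have hga : (rs.reverse ++ a :: b :: rest').getD rs.length ' ' = a := getD_mid rs a (b :: rest')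
      have hgb : (rs.reverse ++ a :: b :: rest').getD (rs.length + 1) ' ' = b := by
        have e : rs.reverse ++ a :: b :: rest' = (a :: rs).reverse ++ b :: rest' := by simp
        rw [e]
        simp
      rw [loopA]
      rw [dif_pos h1, dif_pos h2, hga, hgb]
      by_cases hab : a = b
      · subst hab
        rw [if_pos rfl]
        have htake : (rs.reverse ++ a :: a :: rest').take rs.length = rs.reverse :=
          List.take_left' (by simp)
        have hdrop : (rs.reverse ++ a :: a :: rest').drop (rs.length + 1) = a :: rest' := by
          have e : rs.reverse ++ a :: a :: rest' = (rs.reverse ++ [a]) ++ a :: rest' := by simp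
          rw [e, List.drop_append]
          simp
        have hset : (rs.reverse ++ a :: rest').set rs.length (nextChar a)
            = rs.reverse ++ nextChar a :: rest' := by
          rw [List.set_append_right rs.length (nextChar a) (by simp)]
          simp
        simp only [htake, hdrop, hset]
        have hfold : List.foldl push rs (a :: a :: rest')
            = List.foldl push (push rs (nextChar a)) rest' := by
          simp only [List.foldl_cons, hpa, push, if_true]
        cases rs with
        | nil =>
          have := ih [] (nextChar a :: rest') (by simp at hle ⊢; omega)
            (by simp)
          simpa [hfold, push] using this
        | cons t rs' =>
          have hcht : List.IsChain Ne (rs'.reverse ++ [t]) := by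
            have : List.IsChain Ne ((rs'.reverse ++ [t]) ++ [a]) := by simpa using hch1
            exact (List.isChain_append.mp this).1
          have hpt : push rs' t = t :: rs' := push_chain rs' t hcht
          have e2 : (t :: rs').reverse ++ nextChar a :: rest'
              = rs'.reverse ++ (t :: nextChar a :: rest') := by simp
          have hidx : (t :: rs').length - 1 = rs'.length := by simp
          rw [e2, hidx]
          have := ih rs' (t :: nextChar a :: rest') (by simp at hle ⊢; omega) (by simpa using hcht)
          rw [this, hfold]
          simp only [List.foldl_cons, hpt]
      · rw [if_neg hab]
        have e : rs.reverse ++ a :: b :: rest' = (a :: rs).reverse ++ b :: rest' := by simp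
        have hlast : ((rs.reverse ++ [a])).getLast? = some a := by
          simp [List.getLast?_append]
        have hch2 : List.IsChain Ne ((a :: rs).reverse ++ [b]) := by
          have : List.IsChain Ne ((rs.reverse ++ [a]) ++ [b]) :=
            List.isChain_append.mpr ⟨hch1, List.isChain_singleton b, by
              intro x hx y hy
              rw [hlast] at hx
              simp at hx hy
              subst hx; subst hy; exact hab⟩
          simpa using this
        have := ih (a :: rs) (b :: rest') (by simp at hle ⊢; omega) (by simpa using hch2)
        have eidx : rs.length + 1 = (a :: rs).length := by simp
        rw [eidx, e, this]
        simp only [List.foldl_cons, hpa]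

-- ===== VERDICT (by name: the statement is the Claim_ definition above) =====
theorem solve_spec : Claim_equal_solve := by
  intro s _
  unfold Spec_solve solve solve_alt
  have h := main_lemma (2 * s.toList.length) [] s.toList (by simp)
    (by cases s.toList <;> simp)
  simp only [List.reverse_nil, List.nil_append, List.length_nil] at h
  rw [h]
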